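-- pv_equiv track=rewrite | github.com/jdb130496/code-snippets | xlwings + other UDFs + standalone py scripts/discover_ticker_2.py | _find_all_matches
-- ===== SOURCE A (Python) =====
-- def _find_all_matches(query, results):
--     """Find all potential matches, prioritizing exact matches"""
--     query_words = set(w.lower() for w in query.split() if len(w) > 2)
--
--     exact_matches = []
--     partial_matches = []
--
--     for result in results:
--         description = result.get('description', '').lower()
--         desc_words = set(w.lower() for w in description.split())
--
--         # Exact match - all query words present
--         if query_words.issubset(desc_words):
--             ticker = result.get('ticker', '')
--             if ticker.isdigit():
--                 exact_matches.append(result)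
--             else:
--                 exact_matches.append(result)
--
--         # Partial match - at least half the query words present
--         elif len(query_words.intersection(desc_words)) >= len(query_words) // 2:
--             partial_matches.append(result)
--
--     # Return exact matches first, then partial matches
--     return exact_matches + partial_matches
-- ===== SOURCE B (Python) =====
-- def _find_all_matches(query, results):
--     """Find all potential matches, prioritizing exact matches"""
--     query_words = {w.lower() for w in query.split() if len(w) > 2}
--     half = len(query_words) // 2
--
--     def priority(result):
--         desc_words = {w.lower() for w in result.get('description', '').lower().split()}
--         if query_words.issubset(desc_words):
--             return 0
--         if len(query_words & desc_words) >= half: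
--             return 1
--         return 2
--
--     kept = [r for r in results if priority(r) != 2]
--     return sorted(kept, key=priority)
-- ===== Notes on version B (the rewrite author's own statement) =====
-- stated objective: simpler
-- what changed: Replaces the two-accumulator classifying loop (exact_matches/partial_matches built separately and concatenated, with a redundant isdigit branch) by a single priority function (0 = exact, 1 = partial, 2 = drop), a filter, and one stable sort by priority.
import Mathlib
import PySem

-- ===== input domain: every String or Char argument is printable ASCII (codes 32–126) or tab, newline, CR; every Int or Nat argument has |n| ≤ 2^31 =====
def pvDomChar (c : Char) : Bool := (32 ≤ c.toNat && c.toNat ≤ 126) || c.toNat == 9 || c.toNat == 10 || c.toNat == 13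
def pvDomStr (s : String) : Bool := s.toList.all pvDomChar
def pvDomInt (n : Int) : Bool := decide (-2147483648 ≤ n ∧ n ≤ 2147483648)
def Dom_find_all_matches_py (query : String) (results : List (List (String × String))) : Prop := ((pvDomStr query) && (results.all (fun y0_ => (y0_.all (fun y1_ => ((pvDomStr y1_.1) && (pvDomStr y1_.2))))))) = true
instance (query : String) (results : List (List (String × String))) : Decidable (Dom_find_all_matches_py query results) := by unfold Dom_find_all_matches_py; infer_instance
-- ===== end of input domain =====

-- B replaces A's two-accumulator classifying loop by a priority function (0 exact / 1 partial / 2 drop),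
-- a filter and one stable sort by priority; objective: simpler (the redundant isdigit branch disappears).

-- ===== PORT A =====
-- the body of A's for-loop, as the fold step over the pair (exact_matches, partial_matches)
def pvStepA (query_words : PySem.Set String)
    (acc : List (List (String × String)) × List (List (String × String)))
    (result : List (String × String)) :
    List (List (String × String)) × List (List (String × String)) :=
  let description := PySem.Str.lower (PySem.Dict.getD ⟨result⟩ "description" "")
  let desc_words := PySem.Set.ofList ((PySem.Str.split₀ description).map PySem.Str.lower)
  if PySem.Set.issubset query_words desc_words then
    let ticker := PySem.Dict.getD ⟨result⟩ "ticker" ""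
    if PySem.Str.strIsdigit ticker then (acc.1 ++ [result], acc.2)
    else (acc.1 ++ [result], acc.2)
  else if PySem.Set.len (PySem.Set.inter query_words desc_words) ≥ PySem.Int.floordiv (PySem.Set.len query_words) 2 then
    (acc.1, acc.2 ++ [result])
  else acc

def find_all_matches_py (query : String) (results : List (List (String × String))) : List (List (String × String)) :=
  let query_words := PySem.Set.ofList (((PySem.Str.split₀ query).filter (fun w => decide (PySem.Str.len w > 2))).map PySem.Str.lower)
  let p := results.foldl (pvStepA query_words) ([], [])
  p.1 ++ p.2

-- ===== PORT B =====
-- B's priority helper: 0 = exact match, 1 = partial match, 2 = dropped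
def pvPriority (query_words : PySem.Set String) (half : Int) (result : List (String × String)) : Int :=
  let desc_words := PySem.Set.ofList ((PySem.Str.split₀ (PySem.Str.lower (PySem.Dict.getD ⟨result⟩ "description" ""))).map PySem.Str.lower)
  if PySem.Set.issubset query_words desc_words then 0
  else if PySem.Set.len (PySem.Set.inter query_words desc_words) ≥ half then 1
  else 2

def find_all_matches_py_alt (query : String) (results : List (List (String × String))) : List (List (String × String)) :=
  let query_words := PySem.Set.ofList (((PySem.Str.split₀ query).filter (fun w => decide (PySem.Str.len w > 2))).map PySem.Str.lower)
  let half := PySem.Int.floordiv (PySem.Set.len query_words) 2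
  let kept := results.filter (fun r => pvPriority query_words half r != 2)
  PySem.List.sorted kept (pvPriority query_words half) false

-- ===== PRECONDITION & SPEC =====
def Spec_find_all_matches_py (query : String) (results : List (List (String × String))) (out : List (List (String × String))) : Prop := out = find_all_matches_py_alt query results
instance (query : String) (results : List (List (String × String))) (out : List (List (String × String))) : Decidable (Spec_find_all_matches_py query results out) := by unfold Spec_find_all_matches_py; infer_instance

-- ===== CLAIM (what is proved, stated in full; the proofs are below) =====
def Claim_equal_find_all_matches_py : Prop := ∀ (query : String) (results : List (List (String × String))), Dom_find_all_matches_py query results → Spec_find_all_matches_py query results (find_all_matches_py query results)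

-- ===== LEMMAS AND PROOFS =====

-- A's two classifying conditions, as Bool predicates on one result
def pvC0 (qw : PySem.Set String) (r : List (String × String)) : Bool :=
  PySem.Set.issubset qw (PySem.Set.ofList ((PySem.Str.split₀ (PySem.Str.lower (PySem.Dict.getD ⟨r⟩ "description" ""))).map PySem.Str.lower))
def pvC1 (qw : PySem.Set String) (half : Int) (r : List (String × String)) : Bool :=
  !pvC0 qw r && decide (PySem.Set.len (PySem.Set.inter qw (PySem.Set.ofList ((PySem.Str.split₀ (PySem.Str.lower (PySem.Dict.getD ⟨r⟩ "description" ""))).map PySem.Str.lower))) ≥ half)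

theorem insertBy_append_left {α : Type} (before : α → α → Bool) (x : α) (a0 a1 : List α)
    (h : ∀ y ∈ a0, before x y = false) :
    PySem.List.insertBy before x (a0 ++ a1) = a0 ++ PySem.List.insertBy before x a1 := by
  induction a0 with
  | nil => simp
  | cons y ys ih =>
      simp only [List.cons_append, PySem.List.insertBy, h y (List.mem_cons_self), Bool.false_eq_true,
        if_false]
      simpa using ih (fun z hz => h z (List.mem_cons_of_mem _ hz))

theorem insertBy_all_before {α : Type} (before : α → α → Bool) (x : α) (a1 : List α)
    (h : ∀ y ∈ a1, before x y = true) :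
    PySem.List.insertBy before x a1 = x :: a1 := by
  cases a1 with
  | nil => rfl
  | cons y ys => simp [PySem.List.insertBy, h y (List.mem_cons_self)]

-- stable insertion sort with keys in {0,1} is exactly "the 0-group then the 1-group", in input order
theorem foldl_insertBy_01 {α : Type} (key : α → Int) (xs a0 a1 : List α)
    (hxs : ∀ x ∈ xs, key x = 0 ∨ key x = 1)
    (h0 : ∀ y ∈ a0, key y = 0) (h1 : ∀ y ∈ a1, key y = 1) :
    xs.foldl (fun acc x => PySem.List.insertBy (fun a b => decide (key a < key b)) x acc) (a0 ++ a1)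
      = (a0 ++ xs.filter (fun x => key x == 0)) ++ (a1 ++ xs.filter (fun x => key x == 1)) := by
  induction xs generalizing a0 a1 with
  | nil => simp
  | cons x xs ih =>
      rcases hxs x List.mem_cons_self with hx | hx
      · rw [List.foldl_cons,
          insertBy_append_left _ _ _ _ (fun y hy => by simp [h0 y hy, hx]),
          insertBy_all_before _ _ _ (fun y hy => by simp [h1 y hy, hx])]
        have heq : a0 ++ x :: a1 = (a0 ++ [x]) ++ a1 := by simp
        rw [heq, ih (a0 ++ [x]) a1 (fun z hz => hxs z (List.mem_cons_of_mem _ hz))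
          (fun y hy => by
            rcases List.mem_append.mp hy with h | h
            · exact h0 y h
            · rw [List.mem_singleton.mp h]; exact hx) h1]
        simp [hx]
      · rw [List.foldl_cons,
          PySem.List.insertBy_of_forall_not_before _ _ _
            (fun y hy => by
              rcases List.mem_append.mp hy with h | h
              · simp [h0 y h, hx]
              · simp [h1 y h, hx])]
        have heq : (a0 ++ a1) ++ [x] = a0 ++ (a1 ++ [x]) := by simp
        rw [heq, ih a0 (a1 ++ [x]) (fun z hz => hxs z (List.mem_cons_of_mem _ hz)) h0
          (fun y hy => by
            rcases List.mem_append.mp hy with h | h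
            · exact h1 y h
            · rw [List.mem_singleton.mp h]; exact hx)]
        simp [hx]

theorem sorted_01 {α : Type} (key : α → Int) (xs : List α)
    (hxs : ∀ x ∈ xs, key x = 0 ∨ key x = 1) :
    PySem.List.sorted xs key false
      = xs.filter (fun x => key x == 0) ++ xs.filter (fun x => key x == 1) := by
  have h := foldl_insertBy_01 key xs [] [] hxs (by simp) (by simp)
  simpa [PySem.List.sorted_eq_foldl_insertBy] using h

-- one step of A's loop, expressed through the two conditions
theorem stepA_eq (qw : PySem.Set String) (acc : List (List (String × String)) × List (List (String × String)))
    (r : List (String × String)) :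
    pvStepA qw acc r =
      if pvC0 qw r then (acc.1 ++ [r], acc.2)
      else if pvC1 qw (PySem.Int.floordiv (PySem.Set.len qw) 2) r then (acc.1, acc.2 ++ [r])
      else acc := by
  unfold pvStepA pvC1
  by_cases h0 : pvC0 qw r = true
  · have h0' := h0
    unfold pvC0 at h0'
    simp [h0, h0']
  · have h0' := h0
    unfold pvC0 at h0'
    simp [h0, h0']

-- A's loop produces, over any starting accumulators, the two condition-filters appended
theorem A_loop (qw : PySem.Set String) (results : List (List (String × String)))
    (e p : List (List (String × String))) :
    results.foldl (pvStepA qw) (e, p)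
      = (e ++ results.filter (pvC0 qw), p ++ results.filter (pvC1 qw (PySem.Int.floordiv (PySem.Set.len qw) 2))) := by
  induction results generalizing e p with
  | nil => simp
  | cons r rs ih =>
      rw [List.foldl_cons, stepA_eq]
      generalize hh : PySem.Int.floordiv (PySem.Set.len qw) 2 = half
      rw [hh] at ih
      by_cases hc0 : pvC0 qw r = true
      · have hc1 : pvC1 qw half r = false := by simp [pvC1, hc0]
        simp [ih, hc0, hc1]
      · by_cases hc1 : pvC1 qw half r = true
        · simp [ih, hc0, hc1]
        · simp [ih, hc0, hc1]

theorem priority_range (qw : PySem.Set String) (half : Int) (r : List (String × String)) :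
    pvPriority qw half r = 0 ∨ pvPriority qw half r = 1 ∨ pvPriority qw half r = 2 := by
  unfold pvPriority
  dsimp only
  split_ifs <;> simp

theorem priority_eq_zero_iff (qw : PySem.Set String) (half : Int) (r : List (String × String)) :
    (pvPriority qw half r == 0) = pvC0 qw r := by
  unfold pvPriority pvC0
  dsimp only
  split_ifs with h1 h2 <;> simp [h1]

theorem priority_eq_one_iff (qw : PySem.Set String) (half : Int) (r : List (String × String)) :
    (pvPriority qw half r == 1) = pvC1 qw half r := by
  unfold pvPriority pvC1 pvC0
  dsimp only
  split_ifs with h1 h2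
  · simp [h1]
  · simp only [h1, Bool.not_false, Bool.true_and]
    simp only [BEq.rfl]
    exact (decide_eq_true h2).symm
  · simp only [h1, Bool.not_false, Bool.true_and]
    have : decide (PySem.Set.len (PySem.Set.inter qw (PySem.Set.ofList ((PySem.Str.split₀ (PySem.Str.lower (PySem.Dict.getD ⟨r⟩ "description" ""))).map PySem.Str.lower))) ≥ half) = false := decide_eq_false h2
    rw [this]
    simp

-- ===== VERDICT (by name: the statement is the Claim_ definition above) =====
theorem find_all_matches_py_spec : Claim_equal_find_all_matches_py := by
  intro query results _
  unfold Spec_find_all_matches_py find_all_matches_py find_all_matches_py_alt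
  dsimp only
  generalize PySem.Set.ofList (((PySem.Str.split₀ query).filter (fun w => decide (PySem.Str.len w > 2))).map PySem.Str.lower) = qw
  rw [A_loop]
  generalize hh : PySem.Int.floordiv (PySem.Set.len qw) 2 = half
  rw [sorted_01 (pvPriority qw half) _ (by
        intro x hx
        rcases priority_range qw half x with h | h | h
        · exact Or.inl h
        · exact Or.inr h
        · exfalso
          have hmem := List.of_mem_filter hx
          rw [h] at hmem
          simp at hmem)]
  rw [List.filter_filter, List.filter_filter]
  simp only [List.nil_append]
  congr 1
  · apply List.filter_congr
    intro x _
    rw [← priority_eq_zero_iff qw half x]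
    by_cases h : pvPriority qw half x = 2 <;> simp [h]
  · apply List.filter_congr
    intro x _
    rw [← priority_eq_one_iff qw half x]
    by_cases h : pvPriority qw half x = 2 <;> simp [h]
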